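-- pv_equiv track=rewrite | github.com/yarnspinnered/epi | epi_judge_python/nearest_repeated_entries.py | find_nearest_repetition
-- ===== SOURCE A (Python) =====
-- def find_nearest_repetition(paragraph):
--     d = {}
--     for i,w in enumerate(paragraph):
--         d.setdefault(w, []).append(i)
--     smallest = float('inf')
--     smallest_word = None
--
--     for k,v in d.items():
--         for i in range(len(v) - 1):
--             dist = v[i+1] - v[i]
--             if dist < smallest:
--                 smallest = dist
--                 smallest_word = k
--
--     if smallest == float('inf'):
--         return -1
--     else:
--         return smallest
-- ===== SOURCE B (Python) =====
-- def find_nearest_repetition(paragraph):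
--     last = {}
--     smallest = float('inf')
--     for i, w in enumerate(paragraph):
--         if w in last:
--             dist = i - last[w]
--             if dist < smallest:
--                 smallest = dist
--         last[w] = i
--     return -1 if smallest == float('inf') else smallest
-- ===== Notes on version B (the rewrite author's own statement) =====
-- stated objective: simpler
-- what changed: One pass keeping only each word's most recent index in a dict and updating a running minimum gap, instead of building full per-word position lists and then rescanning every list for consecutive differences.
import Mathlib
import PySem

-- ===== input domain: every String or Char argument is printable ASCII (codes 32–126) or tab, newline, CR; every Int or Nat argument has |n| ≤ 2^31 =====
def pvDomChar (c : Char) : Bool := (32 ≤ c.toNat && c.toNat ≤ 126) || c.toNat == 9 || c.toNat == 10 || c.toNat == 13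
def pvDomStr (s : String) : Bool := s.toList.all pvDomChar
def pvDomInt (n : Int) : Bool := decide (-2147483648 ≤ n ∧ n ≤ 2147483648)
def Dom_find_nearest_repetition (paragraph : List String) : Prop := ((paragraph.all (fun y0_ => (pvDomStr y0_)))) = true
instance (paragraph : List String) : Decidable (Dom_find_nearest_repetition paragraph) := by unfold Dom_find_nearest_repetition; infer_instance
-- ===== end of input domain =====

-- B replaces A's build-all-position-lists-then-rescan with a single pass that keeps only each
-- word's most recent index and a running minimum gap (objective: simpler, same asymptotic cost).


-- ===== PORT A =====
-- `smallest` starts at float('inf') and is only ever assigned int differences, so it is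
-- modelled exactly by `Option Int` with `none` = inf: `dist < inf` is always true, and the
-- final `smallest == float('inf')` test is `none`. Both Pythons update smallest with the
-- identical two lines `if dist < smallest: smallest = dist`, shared here as `omin`.
def omin (smallest : Option Int) (dist : Int) : Option Int :=
  match smallest with
  | none => some dist
  | some s => if dist < s then some dist else smallest

-- A's variable `smallest_word` never influences the returned value and is not carried.
-- `d.setdefault(w, []).append(i)` is exactly `d.modify w [] (· ++ [i])`. In the inner loop
-- `for i in range(len(v) - 1)` every index i and i+1 is nonnegative and in range, so plain
-- Nat indexing with `getD` is exact there.
def find_nearest_repetition (paragraph : List String) : Int :=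
  let d := (PySem.List.enumerate paragraph).foldl
    (fun d p => d.modify p.2 [] (· ++ [p.1])) PySem.Dict.empty
  let smallest := d.items.foldl
    (fun acc kv =>
      (List.range (kv.2.length - 1)).foldl
        (fun acc i => omin acc (kv.2.getD (i + 1) 0 - kv.2.getD i 0)) acc)
    none
  match smallest with
  | none => -1
  | some s => s

-- ===== PORT B =====
-- one pass: `last` maps each word to its most recent index, `smallest` is the running minimum
def find_nearest_repetition_alt (paragraph : List String) : Int :=
  let st := (PySem.List.enumerate paragraph).foldl
    (fun (st : PySem.Dict String Int × Option Int) p =>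
      match st.1.get? p.2 with
      | some j => (st.1.insert p.2 p.1, omin st.2 (p.1 - j))
      | none => (st.1.insert p.2 p.1, st.2))
    (PySem.Dict.empty, none)
  match st.2 with
  | none => -1
  | some s => s

-- ===== PRECONDITION & SPEC =====
def Spec_find_nearest_repetition (paragraph : List String) (out : Int) : Prop := out = find_nearest_repetition_alt paragraph
instance (paragraph : List String) (out : Int) : Decidable (Spec_find_nearest_repetition paragraph out) := by unfold Spec_find_nearest_repetition; infer_instance

-- ===== CLAIM (what is proved, stated in full; the proofs are below) =====
def Claim_equal_find_nearest_repetition : Prop := ∀ (paragraph : List String), Dom_find_nearest_repetition paragraph → Spec_find_nearest_repetition paragraph (find_nearest_repetition paragraph)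

-- ===== LEMMAS AND PROOFS =====

-- min on Option Int with `none` = +inf
def oMin (a b : Option Int) : Option Int :=
  match b with
  | none => a
  | some d => omin a d

-- the list of consecutive differences of v
def gapList (v : List Int) : List Int := (v.zip v.tail).map (fun p => p.2 - p.1)

-- the positions (in order) at which word w occurs in the enumerated paragraph
def posOf (xs : List String) (w : String) : List Int :=
  (((PySem.List.enumerate xs).map Prod.swap).filter (fun p => p.1 == w)).map (·.2)

-- the minimum over all consecutive-position gaps of all words of xs (none = no repetition)
def gMin (xs : List String) : Option Int :=
  ((PySem.Set.ofList xs).flatMap (fun w => gapList (posOf xs w))).foldl omin none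

theorem omin_eq_oMin (a : Option Int) (d : Int) : omin a d = oMin a (some d) := rfl

theorem oMin_some_some (s d : Int) : oMin (some s) (some d) = some (min s d) := by
  simp only [oMin, omin, min_def]
  split_ifs <;> simp_all
  omega

theorem oMin_none_right (a : Option Int) : oMin a none = a := rfl

theorem oMin_none_left (b : Option Int) : oMin none b = b := by
  cases b <;> rfl

theorem oMin_comm (a b : Option Int) : oMin a b = oMin b a := by
  cases a <;> cases b <;> simp [oMin_none_left, oMin_none_right, oMin_some_some, min_comm]

theorem oMin_assoc (a b c : Option Int) : oMin (oMin a b) c = oMin a (oMin b c) := by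
  cases a <;> cases b <;> cases c <;>
    simp [oMin_none_left, oMin_none_right, oMin_some_some, min_assoc]

theorem oMin_left_comm (a b c : Option Int) : oMin a (oMin b c) = oMin b (oMin a c) := by
  rw [← oMin_assoc, oMin_comm a b, oMin_assoc]

theorem foldl_omin (l : List Int) (acc : Option Int) :
    l.foldl omin acc = oMin acc (l.foldl omin none) := by
  induction l generalizing acc with
  | nil => rfl
  | cons d t ih =>
    simp only [List.foldl_cons]
    rw [ih (omin acc d), ih (omin none d), omin_eq_oMin, omin_eq_oMin, oMin_none_left,
      oMin_assoc]

theorem foldl_omin_append (l₁ l₂ : List Int) :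
    (l₁ ++ l₂).foldl omin none = oMin (l₁.foldl omin none) (l₂.foldl omin none) := by
  rw [List.foldl_append, foldl_omin]

-- A's inner index loop over v computes the omin-fold of v's consecutive differences
theorem inner_eq (v : List Int) (acc : Option Int) :
    (List.range (v.length - 1)).foldl
      (fun acc i => omin acc (v.getD (i + 1) 0 - v.getD i 0)) acc
    = (gapList v).foldl omin acc := by
  induction v generalizing acc with
  | nil => rfl
  | cons a t ih =>
    cases t with
    | nil => rfl
    | cons b t' =>
      simp only [List.length_cons, Nat.add_sub_cancel, List.range_succ_eq_map,
        List.foldl_cons, List.foldl_map]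
      have : ∀ (acc : Option Int),
          (List.range ((b :: t').length - 1)).foldl
            (fun acc i => omin acc ((a :: b :: t').getD (i + 1 + 1) 0 - (a :: b :: t').getD (i + 1) 0)) acc
          = (gapList (b :: t')).foldl omin acc := by
        intro acc
        rw [← ih acc]
        simp
      simpa [gapList] using this (omin acc (b - a))

theorem gapList_append_singleton (v : List Int) (j n : Int) (h : v.getLast? = some j) :
    gapList (v ++ [n]) = gapList v ++ [n - j] := by
  induction v generalizing j with
  | nil => simp at h
  | cons a t ih =>
    cases t with
    | nil => simp_all [gapList]
    | cons b t' =>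
      rw [List.getLast?_cons_cons] at h
      have := ih j h
      simp_all [gapList]

theorem posOf_append_singleton (xs : List String) (x w : String) :
    posOf (xs ++ [x]) w = posOf xs w ++ (if x == w then [(xs.length : Int)] else []) := by
  unfold posOf
  rw [PySem.List.enumerate_append]
  by_cases hx : x = w
  · simp [PySem.List.enumerate_cons, PySem.List.enumerate_nil, hx]
  · simp [PySem.List.enumerate_cons, PySem.List.enumerate_nil, hx]

theorem posOf_eq_nil_iff (xs : List String) (w : String) : posOf xs w = [] ↔ w ∉ xs := by
  unfold posOf
  have hmem : w ∈ xs ↔ ∃ a, (a, w) ∈ PySem.List.enumerate xs := by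
    simp only [PySem.List.mem_enumerate_iff]
    constructor
    · intro hw
      obtain ⟨k, hk, he⟩ := List.mem_iff_getElem.mp hw
      exact ⟨(0 + k : Int), k, hk, by simp [he]⟩
    · rintro ⟨a, k, hk, he⟩
      have hw : w = xs[k] := by simpa using congrArg Prod.snd he
      exact hw ▸ List.getElem_mem hk
  simp only [List.map_eq_nil_iff, List.filter_eq_nil_iff, hmem]
  constructor
  · rintro h ⟨a, hq⟩
    exact h (w, a) (List.mem_map.mpr ⟨(a, w), hq, rfl⟩) (by simp)
  · rintro h p hp hb
    obtain ⟨q, hq, rfl⟩ := List.mem_map.mp hp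
    exact h ⟨q.1, by simpa [Prod.swap, ← (beq_iff_eq).mp hb] using hq⟩

theorem posOf_append_of_mem (xs : List String) (x w : String) (hw : w ∈ xs) (hx : x ∉ xs) :
    posOf (xs ++ [x]) w = posOf xs w := by
  rw [posOf_append_singleton]
  have : ¬ (x == w) := by simp; rintro rfl; exact hx hw
  simp [this]

-- A's second phase, applied to any dict that holds each word's position list
theorem phase2 (xs : List String) (D : PySem.Dict String (List Int))
    (hget : ∀ c, D.getD c [] = posOf xs c) (hnd : D.keys.Nodup)
    (hkeys : D.keys = PySem.Set.ofList xs) :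
    D.items.foldl
      (fun acc kv =>
        (List.range (kv.2.length - 1)).foldl
          (fun acc i => omin acc (kv.2.getD (i + 1) 0 - kv.2.getD i 0)) acc)
      none = gMin xs := by
  rw [PySem.Dict.items_eq_map_keys D hnd [], List.foldl_map, hkeys]
  have hfun : (fun (acc : Option Int) (k : String) =>
      (List.range (((k, D.getD k []).2.length - 1))).foldl
        (fun acc i => omin acc ((k, D.getD k []).2.getD (i + 1) 0 - (k, D.getD k []).2.getD i 0)) acc)
      = fun acc k => (gapList (posOf xs k)).foldl omin acc := by
    funext acc k
    simp only []
    rw [inner_eq, hget]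
  rw [hfun, ← List.foldl_flatMap]
  rfl

theorem A_eq_gMin (xs : List String) :
    find_nearest_repetition xs = match gMin xs with | none => -1 | some s => s := by
  have hswap : (PySem.List.enumerate xs).foldl
      (fun d p => d.modify p.2 [] (· ++ [p.1])) PySem.Dict.empty
      = ((PySem.List.enumerate xs).map Prod.swap).foldl
        (fun d p => d.modify p.1 [] (· ++ [p.2])) PySem.Dict.empty := by
    rw [List.foldl_map]
    rfl
  show (match ((PySem.List.enumerate xs).foldl
      (fun d p => d.modify p.2 [] (· ++ [p.1])) PySem.Dict.empty).items.foldl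
      (fun acc kv =>
        (List.range (kv.2.length - 1)).foldl
          (fun acc i => omin acc (kv.2.getD (i + 1) 0 - kv.2.getD i 0)) acc)
      none with
    | none => (-1 : Int)
    | some s => s) = _
  rw [phase2 xs _ ?hget ?hnd ?hkeys]
  case hget =>
    intro c
    rw [hswap, PySem.Dict.getD_foldl_modify_append]
    simp [posOf]
  case hnd =>
    exact PySem.Dict.nodup_keys_foldl_modify_key _ _ _ _ _ PySem.Dict.nodup_keys_empty
  case hkeys =>
    rw [PySem.Dict.keys_foldl_modify_key]
    simp [PySem.List.map_snd_enumerate, PySem.Set.ofList_eq_foldl, PySem.Set.update]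

-- B's loop body, named for the proofs
def bStep (st : PySem.Dict String Int × Option Int) (p : Int × String) :
    PySem.Dict String Int × Option Int :=
  match st.1.get? p.2 with
  | some j => (st.1.insert p.2 p.1, omin st.2 (p.1 - j))
  | none => (st.1.insert p.2 p.1, st.2)

theorem bStep_of_none (st : PySem.Dict String Int × Option Int) (p : Int × String)
    (h : st.1.get? p.2 = none) : bStep st p = (st.1.insert p.2 p.1, st.2) := by
  simp [bStep, h]

theorem bStep_of_some (st : PySem.Dict String Int × Option Int) (p : Int × String) (j : Int)
    (h : st.1.get? p.2 = some j) : bStep st p = (st.1.insert p.2 p.1, omin st.2 (p.1 - j)) := by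
  simp [bStep, h]

-- appending an unseen word leaves the gap minimum unchanged
theorem gMin_append_not_mem (xs : List String) (x : String) (hx : x ∉ xs) :
    gMin (xs ++ [x]) = gMin xs := by
  unfold gMin
  have hS : PySem.Set.ofList (xs ++ [x]) = PySem.Set.ofList xs ++ [x] := by
    have : PySem.Set.ofList (xs ++ [x]) = PySem.Set.add (PySem.Set.ofList xs) x := by
      simp [PySem.Set.ofList_eq_foldl]
    rw [this]
    simp [PySem.Set.add, PySem.Set.contains, PySem.Set.mem_ofList, hx]
  rw [hS, List.flatMap_append]
  have hx' : posOf (xs ++ [x]) x = [(xs.length : Int)] := by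
    rw [posOf_append_singleton, (posOf_eq_nil_iff xs x).mpr hx]
    simp
  have hcong : (PySem.Set.ofList xs).flatMap (fun w => gapList (posOf (xs ++ [x]) w))
      = (PySem.Set.ofList xs).flatMap (fun w => gapList (posOf xs w)) := by
    refine List.flatMap_congr (fun w hw => ?_)
    rw [posOf_append_of_mem xs x w ((PySem.Set.mem_ofList xs w).mp hw) hx]
  rw [hcong]
  simp [hx', gapList]

-- appending a repeated word adds exactly the gap to its previous (last) occurrence
theorem gMin_append_mem (xs : List String) (x : String) (j : Int)
    (hlast : (posOf xs x).getLast? = some j) :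
    gMin (xs ++ [x]) = omin (gMin xs) ((xs.length : Int) - j) := by
  have hx : x ∈ xs := by
    by_contra hx
    rw [(posOf_eq_nil_iff xs x).mpr hx] at hlast
    simp at hlast
  unfold gMin
  have hS : PySem.Set.ofList (xs ++ [x]) = PySem.Set.ofList xs := by
    have : PySem.Set.ofList (xs ++ [x]) = PySem.Set.add (PySem.Set.ofList xs) x := by
      simp [PySem.Set.ofList_eq_foldl]
    rw [this]
    simp [PySem.Set.add, PySem.Set.contains, PySem.Set.mem_ofList, hx]
  rw [hS]
  obtain ⟨S₁, S₂, hsplit⟩ := List.append_of_mem ((PySem.Set.mem_ofList xs x).mpr hx)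
  have hnd : (PySem.Set.ofList xs).Nodup := PySem.Set.nodup_ofList xs
  rw [hsplit] at hnd
  simp only [List.nodup_append, List.nodup_cons] at hnd
  have hx1 : x ∉ S₁ := fun h => hnd.2.2 x h x (List.mem_cons_self) rfl
  have hx2 : x ∉ S₂ := hnd.2.1.1
  have hcong1 : ∀ w ∈ S₁, gapList (posOf (xs ++ [x]) w) = gapList (posOf xs w) := by
    intro w hw
    have hwx : ¬ (x == w) := by simp; rintro rfl; exact hx1 hw
    rw [posOf_append_singleton]; simp [hwx]
  have hcong2 : ∀ w ∈ S₂, gapList (posOf (xs ++ [x]) w) = gapList (posOf xs w) := by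
    intro w hw
    have hwx : ¬ (x == w) := by simp; rintro rfl; exact hx2 hw
    rw [posOf_append_singleton]; simp [hwx]
  have hxx : gapList (posOf (xs ++ [x]) x) = gapList (posOf xs x) ++ [(xs.length : Int) - j] := by
    rw [posOf_append_singleton]
    simp only [beq_self_eq_true, if_true]
    exact gapList_append_singleton _ j _ hlast
  rw [hsplit]
  simp only [List.flatMap_append, List.flatMap_cons]
  rw [List.flatMap_congr hcong1, List.flatMap_congr hcong2, hxx, omin_eq_oMin]
  simp only [foldl_omin_append]
  rw [show ([(xs.length : Int) - j].foldl omin none) = some ((xs.length : Int) - j) from rfl]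
  simp [oMin_assoc, oMin_comm, oMin_left_comm]

theorem bfold_snoc (xs : List String) (x : String) :
    (PySem.List.enumerate (xs ++ [x])).foldl bStep (PySem.Dict.empty, none)
    = bStep ((PySem.List.enumerate xs).foldl bStep (PySem.Dict.empty, none))
        ((xs.length : Int), x) := by
  rw [PySem.List.enumerate_append]
  simp [PySem.List.enumerate_cons, PySem.List.enumerate_nil]

-- B's loop invariant: the dict holds each word's last position, the accumulator the gap minimum
theorem B_inv (xs : List String) :
    (∀ w, ((PySem.List.enumerate xs).foldl bStep (PySem.Dict.empty, none)).1.get? w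
        = (posOf xs w).getLast?)
    ∧ ((PySem.List.enumerate xs).foldl bStep (PySem.Dict.empty, none)).2 = gMin xs := by
  induction xs using List.reverseRecOn with
  | nil =>
    constructor
    · intro w
      simp [PySem.List.enumerate_nil, PySem.Dict.get?_empty, posOf]
    · rfl
  | append_singleton xs x ih =>
    obtain ⟨ih1, ih2⟩ := ih
    rw [bfold_snoc]
    cases hl : (posOf xs x).getLast? with
    | none =>
      rw [bStep_of_none _ _ ((ih1 x).trans hl)]
      have hnil : posOf xs x = [] := List.getLast?_eq_none_iff.mp hl
      have hx : x ∉ xs := (posOf_eq_nil_iff xs x).mp hnil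
      constructor
      · intro w
        simp only [PySem.Dict.get?_insert, posOf_append_singleton]
        by_cases hw : w = x
        · subst hw
          rw [hnil]
          simp
        · have : ¬ (x == w) := by simp; exact fun h => hw h.symm
          simp [hw, this, ih1 w]
      · simpa using ih2.trans (gMin_append_not_mem xs x hx).symm
    | some j =>
      rw [bStep_of_some _ _ j ((ih1 x).trans hl)]
      constructor
      · intro w
        simp only [PySem.Dict.get?_insert, posOf_append_singleton]
        by_cases hw : w = x
        · subst hw
          simp
        · have : ¬ (x == w) := by simp; exact fun h => hw h.symm
          simp [hw, this, ih1 w]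
      · simp only []
        rw [ih2, ← gMin_append_mem xs x j hl]

theorem B_eq_gMin (xs : List String) :
    find_nearest_repetition_alt xs = match gMin xs with | none => -1 | some s => s := by
  show (match ((PySem.List.enumerate xs).foldl bStep (PySem.Dict.empty, none)).2 with
    | none => (-1 : Int)
    | some s => s) = _
  rw [(B_inv xs).2]

-- ===== VERDICT (by name: the statement is the Claim_ definition above) =====
theorem find_nearest_repetition_spec : Claim_equal_find_nearest_repetition := by
  intro xs _
  show _ = _
  rw [A_eq_gMin, B_eq_gMin]
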